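-- pv_equiv track=rewrite | github.com/Tesfamichael12/LeetCode | 1895-minimum-number-of-operations-to-move-all-balls-to-each-box/1895-minimum-number-of-operations-to-move-all-balls-to-each-box.py | minOperations
-- ===== SOURCE A (Python) =====
-- from typing import List
--
-- def minOperations(boxes: str) -> List[int]:
--     res = []
--     for i, box in enumerate(boxes):
--         count = 0
--         for j in range(i + 1, len(boxes)):
--             if boxes[j] == '1':
--                 count += (j - i)
--
--         res.append(count)
--
--     for i in range(len(boxes) - 1, -1, -1):
--         count = 0
--         for j in range(i - 1, -1, -1):
--             if boxes[j] == '1':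
--                 count += abs(j - i)
--
--         res[i] += count
--
--     return res
-- ===== SOURCE B (Python) =====
-- def minOperations(boxes: str):
--     left = []
--     cnt = ops = 0
--     for b in boxes:
--         left.append(ops)
--         if b == '1':
--             cnt += 1
--         ops += cnt
--     right = []
--     cnt = ops = 0
--     for b in reversed(boxes):
--         right.append(ops)
--         if b == '1':
--             cnt += 1
--         ops += cnt
--     right.reverse()
--     return [l + r for l, r in zip(left, right)]
-- ===== Notes on version B (the rewrite author's own statement) =====
-- stated objective: faster
-- what changed: Replaced the two nested quadratic scans (for each box, re-scan all boxes to its right, then all to its left) with two linear passes that carry a running count of seen '1's and an accumulated cost, combined by zipping the left and right pass results.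
import Mathlib
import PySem

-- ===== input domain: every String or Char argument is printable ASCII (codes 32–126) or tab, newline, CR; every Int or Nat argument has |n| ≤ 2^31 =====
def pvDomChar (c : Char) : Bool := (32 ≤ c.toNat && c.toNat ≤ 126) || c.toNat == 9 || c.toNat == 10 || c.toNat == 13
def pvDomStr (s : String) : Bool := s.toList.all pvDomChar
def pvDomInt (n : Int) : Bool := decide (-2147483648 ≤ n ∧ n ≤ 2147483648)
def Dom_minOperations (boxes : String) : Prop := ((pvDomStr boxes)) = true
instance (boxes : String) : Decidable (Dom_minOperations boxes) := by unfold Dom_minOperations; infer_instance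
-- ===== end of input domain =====

-- B replaces A's nested quadratic scans with two linear running-count passes (asymptotic speed-up).

-- ===== PORT A =====
-- literal transliteration of A: first loop appends, for each i, the cost of the ones to
-- its right; second (descending) loop adds the cost of the ones to its left in place.
def minOperations (boxes : String) : List Int :=
  let cs := boxes.toList
  let n : Int := cs.length
  let res : List Int :=
    (PySem.List.enumerate cs).foldl (fun res p =>
      let count : Int :=
        (PySem.List.pyRange (p.1 + 1) n 1).foldl (fun count j =>
          if PySem.List.pyGet? cs j = some '1' then count + (j - p.1) else count) 0
      res ++ [count]) []
  let res :=
    (PySem.List.pyRange (n - 1) (-1) (-1)).foldl (fun res i =>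
      let count : Int :=
        (PySem.List.pyRange (i - 1) (-1) (-1)).foldl (fun count j =>
          if PySem.List.pyGet? cs j = some '1' then count + |j - i| else count) 0
      PySem.List.pySetD res i (PySem.List.pyGetD res i 0 + count)) res
  res

-- ===== PORT B =====
-- literal transliteration of B (Source B): left pass, right pass over the reversed string,
-- reverse the right pass, zip the two with +.
def minOperations_alt (boxes : String) : List Int :=
  let cs := boxes.toList
  let leftSt := cs.foldl (fun (st : List Int × Int × Int) b =>
      let cnt' := st.2.1 + (if b = '1' then 1 else 0)
      (st.1 ++ [st.2.2], cnt', st.2.2 + cnt')) ([], 0, 0)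
  let left := leftSt.1
  let rightSt := cs.reverse.foldl (fun (st : List Int × Int × Int) b =>
      let cnt' := st.2.1 + (if b = '1' then 1 else 0)
      (st.1 ++ [st.2.2], cnt', st.2.2 + cnt')) ([], 0, 0)
  let right := rightSt.1.reverse
  List.zipWith (· + ·) left right

-- ===== PRECONDITION & SPEC =====
def Spec_minOperations (boxes : String) (out : List Int) : Prop := out = minOperations_alt boxes
instance (boxes : String) (out : List Int) : Decidable (Spec_minOperations boxes out) := by unfold Spec_minOperations; infer_instance

-- ===== CLAIM (what is proved, stated in full; the proofs are below) =====
def Claim_equal_minOperations : Prop := ∀ (boxes : String), Dom_minOperations boxes → Spec_minOperations boxes (minOperations boxes)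

-- ===== LEMMAS AND PROOFS =====

-- model of one running-count pass of B: emits ops, then updates (cnt, ops)
def pvPass : List Char → Int → Int → List Int
  | [], _, _ => []
  | b :: t, cnt, ops =>
      ops :: pvPass t (cnt + (if b = '1' then 1 else 0)) (ops + cnt + (if b = '1' then 1 else 0))

-- cost of moving every '1' strictly left of position k to position k
def pvW (cs : List Char) (k : Nat) : Int :=
  ∑ j ∈ Finset.range k, (if cs[j]? = some '1' then (k : Int) - j else 0)

theorem pv_sum_map_range (f : Nat → Int) (m : Nat) :
    ((List.range m).map f).sum = ∑ j ∈ Finset.range m, f j := by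
  induction m with
  | zero => simp
  | succ m ih => simp [List.range_succ, Finset.sum_range_succ, ih]

theorem pvPass_length (l : List Char) (cnt ops : Int) : (pvPass l cnt ops).length = l.length := by
  induction l generalizing cnt ops with
  | nil => simp [pvPass]
  | cons b t ih => simp [pvPass, ih]

theorem pvW_cons (b : Char) (t : List Char) (k : Nat) :
    pvW (b :: t) (k + 1) = (if b = '1' then (k : Int) + 1 else 0) + pvW t k := by
  unfold pvW
  rw [Finset.sum_range_succ']
  push_cast
  simp only [List.getElem?_cons_succ, List.getElem?_cons_zero]
  rw [add_comm]
  congr 1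
  · simp
  · apply Finset.sum_congr rfl
    intro j hj
    ring_nf

theorem pvPass_getElem (l : List Char) (cnt ops : Int) (k : Nat) (hk : k < (pvPass l cnt ops).length) :
    (pvPass l cnt ops)[k] = ops + k * cnt + pvW l k := by
  induction l generalizing cnt ops k with
  | nil => simp [pvPass] at hk
  | cons b t ih =>
      cases k with
      | zero => simp [pvPass, pvW]
      | succ k =>
          have hk' : k < (pvPass t (cnt + (if b = '1' then 1 else 0)) (ops + cnt + (if b = '1' then 1 else 0))).length := by
            simp [pvPass] at hk ⊢
            simpa [pvPass_length] using hk
          have := ih (cnt + (if b = '1' then 1 else 0)) (ops + cnt + (if b = '1' then 1 else 0)) k hk'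
          simp only [pvPass, List.getElem_cons_succ]
          rw [this, pvW_cons]
          push_cast
          split_ifs <;> ring

-- the foldl in port B computes pvPass
theorem pvFold_pass (l : List Char) (acc : List Int) (cnt ops : Int) :
    (l.foldl (fun (st : List Int × Int × Int) b =>
      let cnt' := st.2.1 + (if b = '1' then 1 else 0)
      (st.1 ++ [st.2.2], cnt', st.2.2 + cnt')) (acc, cnt, ops)).1 = acc ++ pvPass l cnt ops := by
  induction l generalizing acc cnt ops with
  | nil => simp [pvPass]
  | cons b t ih => simp [pvPass, ih]; ring_nf

-- A's inner left scan (descending) is pvW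
theorem pv_countL (cs : List Char) (k : Nat) :
    ((PySem.List.pyRange ((k : Int) - 1) (-1) (-1)).foldl (fun count j =>
        if PySem.List.pyGet? cs j = some '1' then count + |j - (k : Int)| else count) 0)
      = pvW cs k := by
  have hfun : (fun (count : Int) (j : Int) =>
      if PySem.List.pyGet? cs j = some '1' then count + |j - (k : Int)| else count)
      = (fun count j => count + (if PySem.List.pyGet? cs j = some '1' then |j - (k : Int)| else 0)) := by
    funext c j; split_ifs <;> simp
  rw [hfun, PySem.List.foldl_add, PySem.List.pyRange_neg_one_eq_reverse]
  have h1 : (-1 : Int) + 1 = 0 := by norm_num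
  have h2 : (k : Int) - 1 + 1 = k := by ring
  rw [h1, h2, List.map_reverse, List.sum_reverse, PySem.List.pyRange_one]
  simp only [sub_zero, Int.toNat_natCast, List.map_map, zero_add]
  rw [pv_sum_map_range]
  unfold pvW
  apply Finset.sum_congr rfl
  intro j hj
  have hj' : j < k := Finset.mem_range.mp hj
  simp only [Function.comp, PySem.List.pyGet?_natCast]
  split_ifs with h
  · rw [abs_of_nonpos (by omega)]; omega
  · rfl

-- A's inner right scan is pvW of the reversed string
theorem pv_countR (cs : List Char) (k : Nat) (hk : k < cs.length) :
    ((PySem.List.pyRange ((k : Int) + 1) (cs.length : Int) 1).foldl (fun count j =>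
        if PySem.List.pyGet? cs j = some '1' then count + (j - (k : Int)) else count) 0)
      = pvW cs.reverse (cs.length - 1 - k) := by
  have hfun : (fun (count : Int) (j : Int) =>
      if PySem.List.pyGet? cs j = some '1' then count + (j - (k : Int)) else count)
      = (fun count j => count + (if PySem.List.pyGet? cs j = some '1' then j - (k : Int) else 0)) := by
    funext c j; split_ifs <;> simp
  rw [hfun, PySem.List.foldl_add, PySem.List.pyRange_one]
  have hm : ((cs.length : Int) - ((k : Int) + 1)).toNat = cs.length - 1 - k := by omega
  rw [hm, List.map_map, pv_sum_map_range, zero_add]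
  unfold pvW
  rw [← Finset.sum_range_reflect (δ := Int) (fun (j : Nat) =>
        if cs.reverse[j]? = some '1' then ((cs.length - 1 - k : Nat) : Int) - (j : Int) else 0)
      (cs.length - 1 - k)]
  apply Finset.sum_congr rfl
  intro t ht
  have ht' : t < cs.length - 1 - k := Finset.mem_range.mp ht
  have hidx : (k : Int) + 1 + (t : Int) = ((k + 1 + t : Nat) : Int) := by push_cast; ring
  simp only [Function.comp, hidx, PySem.List.pyGet?_natCast]
  rw [List.getElem?_reverse (by omega)]
  have hsame : cs.length - 1 - (cs.length - 1 - k - 1 - t) = k + 1 + t := by omega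
  rw [hsame]
  split_ifs with h
  · omega
  · rfl

-- A's second (descending, in-place) loop, pointwise
theorem pv_setLoop (g : Int → Int) (m : Nat) (res : List Int) (hm : m ≤ res.length)
    (k : Nat) (hk : k < res.length) :
    ((PySem.List.pyRange ((m : Int) - 1) (-1) (-1)).foldl (fun r i =>
        PySem.List.pySetD r i (PySem.List.pyGetD r i 0 + g i)) res)[k]?
      = some (if k < m then res[k] + g k else res[k]) := by
  induction m generalizing res with
  | zero =>
      rw [PySem.List.pyRange_neg_one_eq_nil (by norm_num)]
      simp [List.getElem?_eq_getElem hk]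
  | succ m ih =>
      have h1 : ((m + 1 : Nat) : Int) - 1 = (m : Int) := by push_cast; ring
      rw [h1, PySem.List.pyRange_neg_one_cons (by omega)]
      simp only [List.foldl_cons]
      have hmr : m < res.length := by omega
      have hset : PySem.List.pySetD res (m : Int) (PySem.List.pyGetD res (m : Int) 0 + g m)
          = res.set m (res[m] + g m) := by
        rw [PySem.List.pySetD_natCast, PySem.List.pyGetD_natCast, List.getD_eq_getElem res 0 hmr]
      rw [hset]
      have hlen : (res.set m (res[m] + g m)).length = res.length := by simp
      have := ih (res.set m (res[m] + g m)) (by omega) (by omega)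
      rw [this]
      congr 1
      by_cases hkm : k < m
      · simp [hkm, Nat.lt_succ_of_lt hkm, Nat.ne_of_gt hkm]
      · by_cases hke : k = m
        · subst hke
          simp
        · have h2 : ¬ k < m + 1 := by omega
          simp [hkm, h2, Ne.symm hke]

theorem pv_setLoop_length (g : Int → Int) (I : List Int) (res : List Int) :
    (I.foldl (fun r i => PySem.List.pySetD r i (PySem.List.pyGetD r i 0 + g i)) res).length
      = res.length := by
  induction I generalizing res with
  | nil => rfl
  | cons i t ih => simp [ih, PySem.List.length_pySetD]

-- ===== VERDICT (by name: the statement is the Claim_ definition above) =====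
theorem minOperations_spec : Claim_equal_minOperations := by
  intro boxes _
  show minOperations boxes = minOperations_alt boxes
  unfold minOperations minOperations_alt
  simp only []
  generalize boxes.toList = cs
  rw [pvFold_pass cs [] 0 0, pvFold_pass cs.reverse [] 0 0, List.nil_append, List.nil_append]
  rw [PySem.List.foldl_append_singleton_eq_map, List.nil_append]
  have hlen1 : (List.map (fun p =>
      List.foldl (fun count j => if PySem.List.pyGet? cs j = some '1' then count + (j - p.1) else count) 0
        (PySem.List.pyRange (p.1 + 1) (cs.length : Int)))
      (PySem.List.enumerate cs)).length = cs.length := by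
    simp [PySem.List.length_enumerate]
  have hzipLen : (List.zipWith (fun x1 x2 => x1 + x2) (pvPass cs 0 0) (pvPass cs.reverse 0 0).reverse).length
      = cs.length := by
    simp [pvPass_length]
  apply List.ext_getElem?
  intro k
  by_cases hk : k < cs.length
  · rw [pv_setLoop _ cs.length _ (le_of_eq hlen1.symm) k (by rw [hlen1]; exact hk)]
    rw [List.getElem?_eq_getElem (by rw [hzipLen]; exact hk)]
    congr 1
    rw [List.getElem_zipWith]
    simp only [if_pos hk, List.getElem_map, PySem.List.getElem_enumerate, zero_add]
    rw [pv_countR cs k hk, pv_countL cs k]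
    rw [pvPass_getElem cs 0 0 k (by rw [pvPass_length]; exact hk)]
    rw [List.getElem_reverse]
    rw [pvPass_getElem cs.reverse 0 0 _ (by simp [pvPass_length]; omega)]
    simp only [pvPass_length, List.length_reverse]
    ring
  · rw [List.getElem?_eq_none, List.getElem?_eq_none]
    · rw [hzipLen]; omega
    · rw [pv_setLoop_length, hlen1]; omega
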